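-- pv_equiv track=rewrite | github.com/polirritmico/codesignal_solutions | Python/The Core/areSimilar.py | solution
-- ===== SOURCE A (Python) =====
-- def solution(array_a: list[int], array_b: list[int]) -> bool:
--     diff_a = []
--     diff_b = []
--     for a, b in zip(array_a, array_b):
--         if a != b:
--             diff_a.append(a)
--             diff_b.insert(0, b)
--     length = len(diff_a)
--
--     return length == 0 or (length == 2 and diff_a == diff_b)
-- ===== SOURCE B (Python) =====
-- def solution(array_a: list[int], array_b: list[int]) -> bool:
--     # Swap-and-compare: if the aligned parts are equal, accept; otherwise locate
--     # the first and last mismatch positions, swap those two entries of a, and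
--     # accept iff the result now equals b.
--     pairs = list(zip(array_a, array_b))
--     a = [x for x, _ in pairs]
--     b = [y for _, y in pairs]
--     if a == b:
--         return True
--     i = next(k for k, (x, y) in enumerate(pairs) if x != y)
--     r = next(k for k, (x, y) in enumerate(reversed(pairs)) if x != y)
--     j = len(pairs) - 1 - r
--     a[i], a[j] = a[j], a[i]
--     return a == b
-- ===== Notes on version B (the rewrite author's own statement) =====
-- stated objective: faster
-- what changed: A collects the mismatched values into two parallel lists (the second built reversed via insert(0), linear per insertion) and accepts iff there are 0 of them or exactly 2 with the lists equal; B never counts mismatches: it finds the first and last mismatch positions, swaps those two entries of a, and accepts iff the swapped list equals b.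
import Mathlib
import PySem

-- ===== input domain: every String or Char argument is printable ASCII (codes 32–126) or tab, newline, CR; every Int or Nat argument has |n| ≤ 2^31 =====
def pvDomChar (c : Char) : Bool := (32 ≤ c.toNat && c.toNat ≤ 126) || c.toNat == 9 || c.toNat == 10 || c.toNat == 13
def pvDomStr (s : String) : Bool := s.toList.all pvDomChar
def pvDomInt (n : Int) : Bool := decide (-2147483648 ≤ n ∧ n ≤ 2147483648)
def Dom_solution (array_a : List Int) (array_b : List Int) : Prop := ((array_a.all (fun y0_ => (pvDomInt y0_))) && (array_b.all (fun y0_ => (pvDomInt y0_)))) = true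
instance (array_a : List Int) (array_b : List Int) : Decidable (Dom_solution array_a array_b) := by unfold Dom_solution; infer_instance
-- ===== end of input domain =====

-- B replaces A's two parallel diff-value lists (one built reversed via quadratic insert(0))
-- by a swap-and-compare algorithm: swap the first and last mismatch positions of a and
-- test list equality against b (faster: O(n) instead of O(n + d^2) for d mismatches).


-- ===== PORT A =====
def solution (array_a : List Int) (array_b : List Int) : Bool :=
  let state := (array_a.zip array_b).foldl
    (fun (acc : List Int × List Int) (p : Int × Int) =>
      if p.1 ≠ p.2 then (acc.1 ++ [p.1], p.2 :: acc.2) else acc) ([], [])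
  let length := state.1.length
  (length == 0) || ((length == 2) && (state.1 == state.2))

-- ===== PORT B =====
def solution_alt (array_a : List Int) (array_b : List Int) : Bool :=
  let pairs := array_a.zip array_b
  let a := pairs.map Prod.fst
  let b := pairs.map Prod.snd
  if a == b then true
  else
    -- first mismatch position (scanning forward), last one (scanning from the back)
    let i := pairs.findIdx (fun p => p.1 != p.2)
    let r := pairs.reverse.findIdx (fun p => p.1 != p.2)
    let j := pairs.length - 1 - r
    -- a[i], a[j] = a[j], a[i]
    ((a.set i (a.getD j 0)).set j (a.getD i 0)) == b

-- ===== PRECONDITION & SPEC =====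
def Spec_solution (array_a : List Int) (array_b : List Int) (out : Bool) : Prop := out = solution_alt array_a array_b
instance (array_a : List Int) (array_b : List Int) (out : Bool) : Decidable (Spec_solution array_a array_b out) := by unfold Spec_solution; infer_instance

-- ===== CLAIM (what is proved, stated in full; the proofs are below) =====
def Claim_equal_solution : Prop := ∀ (array_a : List Int) (array_b : List Int), Dom_solution array_a array_b → Spec_solution array_a array_b (solution array_a array_b)

-- ===== LEMMAS AND PROOFS =====

-- the mismatched pairs of the zipped input, in order
def mism (l : List (Int × Int)) : List (Int × Int) := l.filter (fun p => p.1 != p.2)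

-- A's result as a function of the mismatched pairs
def Acore (l : List (Int × Int)) : Bool :=
  match mism l with
  | [] => true
  | [p, q] => (p.1 == q.2) && (p.2 == q.1)
  | _ => false

-- B's body as a function of the zipped list
def Bcore (l : List (Int × Int)) : Bool :=
  let a := l.map Prod.fst
  let b := l.map Prod.snd
  if a == b then true
  else
    let i := l.findIdx (fun p => p.1 != p.2)
    let r := l.reverse.findIdx (fun p => p.1 != p.2)
    let j := l.length - 1 - r
    ((a.set i (a.getD j 0)).set j (a.getD i 0)) == b

lemma alt_eq_Bcore (aa bb : List Int) : solution_alt aa bb = Bcore (aa.zip bb) := rfl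

lemma mism_nil : mism [] = [] := rfl

lemma mism_cons (p : Int × Int) (l : List (Int × Int)) :
    mism (p :: l) = if p.1 ≠ p.2 then p :: mism l else mism l := by
  by_cases h : p.1 = p.2 <;> simp [mism, h]

lemma mism_append (s t : List (Int × Int)) : mism (s ++ t) = mism s ++ mism t := by
  simp [mism]

-- the parallel value lists agree iff there is no mismatched pair
lemma maps_eq_iff (t : List (Int × Int)) :
    t.map Prod.fst = t.map Prod.snd ↔ mism t = [] := by
  induction t with
  | nil => simp [mism_nil]
  | cons p s ih =>
    by_cases h : p.1 = p.2
    · simp [mism_cons, h, ih]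
    · simp [mism_cons, h]

lemma exists_of_mism_ne (t : List (Int × Int)) (h : mism t ≠ []) :
    ∃ x ∈ t, (x.1 != x.2) = true := by
  obtain ⟨x, hx⟩ := List.exists_mem_of_ne_nil _ h
  rcases List.mem_filter.mp hx with ⟨hmem, hpred⟩
  exact ⟨x, hmem, hpred⟩

lemma findIdx_lt_of_mism (t : List (Int × Int)) (h : mism t ≠ []) :
    t.findIdx (fun p => p.1 != p.2) < t.length := by
  rw [List.findIdx_lt_length]
  exact exists_of_mism_ne t h

lemma findIdx_rev_lt_of_mism (t : List (Int × Int)) (h : mism t ≠ []) :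
    t.reverse.findIdx (fun p => p.1 != p.2) < t.length := by
  obtain ⟨x, hmem, hpred⟩ := exists_of_mism_ne t h
  have h2 : t.reverse.findIdx (fun p => p.1 != p.2) < t.reverse.length :=
    List.findIdx_lt_length.mpr ⟨x, List.mem_reverse.mpr hmem, hpred⟩
  simpa using h2

-- A's loop: appends the mismatched firsts, prepends the mismatched seconds
lemma foldlA (l : List (Int × Int)) : ∀ (da db : List Int),
    l.foldl (fun (acc : List Int × List Int) (p : Int × Int) =>
      if p.1 ≠ p.2 then (acc.1 ++ [p.1], p.2 :: acc.2) else acc) (da, db)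
    = (da ++ (mism l).map Prod.fst, ((mism l).map Prod.snd).reverse ++ db) := by
  induction l with
  | nil => intro da db; simp [mism_nil]
  | cons p t ih =>
    intro da db
    rw [List.foldl_cons, mism_cons]
    by_cases h : p.1 ≠ p.2
    · rw [if_pos h, if_pos h, ih]; simp
    · rw [if_neg h, if_neg h, ih]

lemma solution_eq_Acore (aa bb : List Int) : solution aa bb = Acore (aa.zip bb) := by
  unfold solution Acore
  rw [foldlA]
  cases hm : mism (aa.zip bb) with
  | nil => simp
  | cons p u =>
    cases u with
    | nil => simp
    | cons q v =>
      cases v with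
      | nil =>
        simp
        congr 1
        by_cases hc : q.1 = p.2
        · have h' : p.2 = q.1 := hc.symm
          rw [beq_iff_eq.mpr hc, beq_iff_eq.mpr h']
        · have h' : ¬ p.2 = q.1 := fun hh => hc hh.symm
          rw [beq_eq_false_iff_ne.mpr hc, beq_eq_false_iff_ne.mpr h']
      | cons r w => simp

-- stripping an equal head pair leaves B's answer unchanged
lemma Bcore_cons_eq (p : Int × Int) (t : List (Int × Int)) (hp : p.1 = p.2) :
    Bcore (p :: t) = Bcore t := by
  by_cases ht : mism t = []
  · have h1 : t.map Prod.fst = t.map Prod.snd := (maps_eq_iff t).mpr ht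
    have h0 : mism (p :: t) = [] := by rw [mism_cons]; simp [hp, ht]
    have h2 := (maps_eq_iff (p :: t)).mpr h0
    simp only [Bcore]
    rw [if_pos (by simpa using h2), if_pos (by simpa using h1)]
  · have hmt : ¬ t.map Prod.fst = t.map Prod.snd := fun hc => ht ((maps_eq_iff t).mp hc)
    have hml : ¬ (p :: t).map Prod.fst = (p :: t).map Prod.snd := by
      intro hc
      simp only [List.map_cons, List.cons.injEq] at hc
      exact hmt hc.2
    have hrt := findIdx_rev_lt_of_mism t ht
    simp only [Bcore]
    rw [if_neg (by simpa using hml), if_neg (by simpa using hmt)]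
    have hfind : (p :: t).findIdx (fun p => p.1 != p.2)
        = t.findIdx (fun p => p.1 != p.2) + 1 := by
      rw [List.findIdx_cons]
      simp [hp]
    have hrev : (p :: t).reverse.findIdx (fun p => p.1 != p.2)
        = t.reverse.findIdx (fun p => p.1 != p.2) := by
      rw [List.reverse_cons, List.findIdx_append, if_pos (by simpa using hrt)]
    rw [hfind, hrev]
    have hj : (p :: t).length - 1 - t.reverse.findIdx (fun p => p.1 != p.2)
        = (t.length - 1 - t.reverse.findIdx (fun p => p.1 != p.2)) + 1 := by
      simp only [List.length_cons]; omega
    rw [hj]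
    simp [hp]

-- stripping an equal last pair leaves B's answer unchanged (given a mismatch earlier)
lemma Bcore_concat_eq (q : Int × Int) (t : List (Int × Int)) (hq : q.1 = q.2)
    (ht : mism t ≠ []) : Bcore (t ++ [q]) = Bcore t := by
  have hmt : ¬ t.map Prod.fst = t.map Prod.snd := fun hc => ht ((maps_eq_iff t).mp hc)
  have hml : ¬ (t ++ [q]).map Prod.fst = (t ++ [q]).map Prod.snd := by
    intro hc
    simp only [List.map_append, List.map_cons, List.map_nil] at hc
    rw [hq] at hc
    exact hmt (List.append_cancel_right hc)
  have hit := findIdx_lt_of_mism t ht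
  have hrt := findIdx_rev_lt_of_mism t ht
  simp only [Bcore]
  rw [if_neg (by simpa using hml), if_neg (by simpa using hmt)]
  have hfind : (t ++ [q]).findIdx (fun p => p.1 != p.2)
      = t.findIdx (fun p => p.1 != p.2) := by
    rw [List.findIdx_append, if_pos hit]
  have hrev : (t ++ [q]).reverse.findIdx (fun p => p.1 != p.2)
      = t.reverse.findIdx (fun p => p.1 != p.2) + 1 := by
    rw [List.reverse_append]
    simp only [List.reverse_cons, List.reverse_nil, List.nil_append, List.singleton_append]
    rw [List.findIdx_cons]
    simp [hq]
  rw [hfind, hrev]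
  set i := t.findIdx (fun p => p.1 != p.2) with hidef
  set r := t.reverse.findIdx (fun p => p.1 != p.2) with hrdef
  have hj : (t ++ [q]).length - 1 - (r + 1) = t.length - 1 - r := by
    simp only [List.length_append, List.length_cons, List.length_nil]; omega
  rw [hj]
  set j := t.length - 1 - r with hjdef
  have hjl : j < t.length := by omega
  have hilm : i < (t.map Prod.fst).length := by simpa using hit
  have hjlm : j < (t.map Prod.fst).length := by simpa using hjl
  simp only [List.map_append]
  rw [List.getD_append _ _ _ j hjlm, List.getD_append _ _ _ i hilm]
  rw [List.set_append, if_pos hilm]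
  rw [List.set_append, if_pos (by simpa using hjlm)]
  simp only [List.map_cons, List.map_nil]
  rw [hq]
  by_cases hc : (((t.map Prod.fst).set i ((t.map Prod.fst).getD j 0)).set j
      ((t.map Prod.fst).getD i 0)) = t.map Prod.snd
  · rw [beq_iff_eq.mpr hc, beq_iff_eq.mpr (by rw [hc])]
  · rw [beq_eq_false_iff_ne.mpr hc, beq_eq_false_iff_ne.mpr
      (fun hcc => hc (List.append_cancel_right hcc))]

-- the core case: both endpoints mismatched
lemma list_swap_iff (p q : Int × Int) (ma mb : List Int) (h : ma.length = mb.length) :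
    ((q.1 :: ma) ++ [p.1]) = ((p.2 :: mb) ++ [q.2]) ↔ (q.1 = p.2 ∧ p.1 = q.2 ∧ ma = mb) := by
  constructor
  · intro hc
    rcases List.append_inj' hc rfl with ⟨h3, h4⟩
    injection h3 with h1 h2
    refine ⟨h1, ?_, h2⟩
    injection h4
  · rintro ⟨h1, h2, h3⟩
    rw [h1, h2, h3]

lemma getD_last (xs : List Int) (x : Int) (n : Nat) (h : n = xs.length) :
    (xs ++ [x]).getD n 0 = x := by
  subst h
  induction xs with
  | nil => rfl
  | cons y ys ih => simpa using ih

lemma set_last (xs : List Int) (x y : Int) (n : Nat) (h : n = xs.length) :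
    (xs ++ [x]).set n y = xs ++ [y] := by
  subst h
  induction xs with
  | nil => rfl
  | cons z zs ih => simpa using ih

-- the core case: both endpoints mismatched
lemma Bcore_ends (p q : Int × Int) (m : List (Int × Int))
    (hp : p.1 ≠ p.2) (hq : q.1 ≠ q.2) :
    Bcore ((p :: m) ++ [q])
      = ((q.1 == p.2) && (p.1 == q.2) && (m.map Prod.fst == m.map Prod.snd)) := by
  have hml : ¬ ((p :: m) ++ [q]).map Prod.fst = ((p :: m) ++ [q]).map Prod.snd := by
    intro hc
    simp only [List.map_append, List.map_cons, List.map_nil, List.cons_append] at hc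
    injection hc with h1 _
    exact hp h1
  simp only [Bcore]
  rw [if_neg (by simpa using hml)]
  have hpb : (p.1 != p.2) = true := by simpa [bne_iff_ne] using hp
  have hqb : (q.1 != q.2) = true := by simpa [bne_iff_ne] using hq
  have hfind : ((p :: m) ++ [q]).findIdx (fun p => p.1 != p.2) = 0 := by
    simp [List.cons_append, List.findIdx_cons, hpb]
  have hrev : ((p :: m) ++ [q]).reverse.findIdx (fun p => p.1 != p.2) = 0 := by
    simp only [List.reverse_append, List.reverse_cons, List.reverse_nil, List.nil_append,
      List.singleton_append, List.findIdx_cons]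
    simp [hqb]
  rw [hfind, hrev]
  have hj : ((p :: m) ++ [q]).length - 1 - 0 = m.length + 1 := by
    simp only [List.length_append, List.length_cons, List.length_nil]
    omega
  rw [hj]
  simp only [List.map_append, List.map_cons, List.map_nil]
  rw [getD_last (p.1 :: m.map Prod.fst) q.1 (m.length + 1) (by simp)]
  rw [show ((p.1 :: List.map Prod.fst m) ++ [q.1]).getD 0 0 = p.1 from rfl]
  rw [List.set_append, if_pos (by simp)]
  simp only [List.set_cons_zero]
  rw [set_last (q.1 :: m.map Prod.fst) q.1 p.1 (m.length + 1) (by simp)]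
  have hiff := list_swap_iff p q (m.map Prod.fst) (m.map Prod.snd) (by simp)
  by_cases h1 : q.1 = p.2 <;> by_cases h2 : p.1 = q.2 <;>
    by_cases h3 : (m.map Prod.fst) = (m.map Prod.snd) <;>
      simp [beq_eq_decide, hiff, h1, h2, h3]

-- Acore at the core case
lemma Acore_ends (p q : Int × Int) (m : List (Int × Int))
    (hp : p.1 ≠ p.2) (hq : q.1 ≠ q.2) :
    Acore ((p :: m) ++ [q])
      = ((q.1 == p.2) && (p.1 == q.2) && (m.map Prod.fst == m.map Prod.snd)) := by
  have hmm : mism ((p :: m) ++ [q]) = (p :: mism m) ++ [q] := by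
    rw [mism_append, show mism (p :: m) = p :: mism m by rw [mism_cons, if_pos hp],
      show mism [q] = [q] by simp [mism, bne_iff_ne, hq]]
  by_cases h2 : m.map Prod.fst = m.map Prod.snd
  · have hmnil : mism m = [] := (maps_eq_iff m).mp h2
    unfold Acore
    rw [hmm, hmnil]
    simp only [List.cons_append, List.nil_append]
    rw [beq_iff_eq.mpr h2]
    by_cases ha : p.1 = q.2
    · by_cases hb : p.2 = q.1
      · rw [beq_iff_eq.mpr ha, beq_iff_eq.mpr hb, beq_iff_eq.mpr hb.symm]
        simp
      · rw [beq_iff_eq.mpr ha, beq_eq_false_iff_ne.mpr hb,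
          beq_eq_false_iff_ne.mpr (fun h => hb h.symm)]
        simp
    · rw [beq_eq_false_iff_ne.mpr ha]
      simp
  · have hne : mism m ≠ [] := fun hc => h2 ((maps_eq_iff m).mpr hc)
    unfold Acore
    rw [hmm]
    rw [beq_eq_false_iff_ne.mpr h2]
    cases hm : mism m with
    | nil => exact absurd hm hne
    | cons x u => simp [List.cons_append]

lemma Acore_cons_eq (p : Int × Int) (t : List (Int × Int)) (hp : p.1 = p.2) :
    Acore (p :: t) = Acore t := by
  unfold Acore
  rw [mism_cons, if_neg (by simp [hp])]

lemma Acore_concat_eq (q : Int × Int) (t : List (Int × Int)) (hq : q.1 = q.2) :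
    Acore (t ++ [q]) = Acore t := by
  unfold Acore
  rw [mism_append, show mism [q] = [] by simp [mism, hq], List.append_nil]

lemma core_eq_aux : ∀ (n : Nat) (l : List (Int × Int)), l.length ≤ n → Bcore l = Acore l := by
  intro n
  induction n with
  | zero =>
    intro l hl
    have : l = [] := List.length_eq_zero_iff.mp (Nat.le_zero.mp hl)
    subst this
    rfl
  | succ n ih =>
    intro l hl
    cases l with
    | nil => rfl
    | cons p t =>
      by_cases hp : p.1 = p.2
      · rw [Bcore_cons_eq p t hp, Acore_cons_eq p t hp]
        exact ih t (by simpa using Nat.lt_succ_iff.mp (Nat.lt_of_lt_of_le (by simp) hl))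
      · rcases List.eq_nil_or_concat t with rfl | ⟨m, q, rfl⟩
        · -- l = [p], single mismatch: both false
          unfold Bcore Acore
          rw [mism_cons, if_pos hp, mism_nil]
          simp [hp]
        · by_cases hq : q.1 = q.2
          · have hmt : mism (p :: m) ≠ [] := by
              rw [mism_cons, if_pos hp]; simp
            rw [show (p :: m.concat q : List (Int × Int)) = (p :: m) ++ [q] by simp]
            rw [Bcore_concat_eq q (p :: m) hq hmt, Acore_concat_eq q (p :: m) hq]
            refine ih (p :: m) ?_
            simp only [List.length_cons, List.length_concat] at hl ⊢
            omega
          · rw [show (p :: m.concat q : List (Int × Int)) = (p :: m) ++ [q] by simp]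
            rw [Bcore_ends p q m hp hq, Acore_ends p q m hp hq]

-- ===== VERDICT (by name: the statement is the Claim_ definition above) =====
theorem solution_spec : Claim_equal_solution := by
  intro array_a array_b _
  unfold Spec_solution
  rw [alt_eq_Bcore, solution_eq_Acore]
  exact (core_eq_aux (array_a.zip array_b).length _ le_rfl).symm
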